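-- pv_equiv track=rewrite | github.com/Logic-1729/CS2205-Lexer | tests/verify_dot.py | tokenize_linear
-- ===== SOURCE A (Python) =====
-- def tokenize_linear(regex):
--     """
--     将简化的正则表达式（无选择结构）切分为 (原子, 量词) 序列。
--     原子：字符类（如 [a-z]）或单个字符
--     量词：'', '?', '*', '+'
--     """
--     tokens = []
--     i, n = 0, len(regex)
--     while i < n:
--         if regex[i] == "[":
--             j = i + 1
--             while j < n and regex[j] != "]":
--                 j += 1
--             atom = regex[i : j + 1] if j < n else regex[i:n]
--             i = j + 1
--         else:
--             atom = regex[i]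
--             i += 1
--         quant = ""
--         if i < n and regex[i] in "?*+":
--             quant = regex[i]
--             i += 1
--         tokens.append((atom, quant))  # 如果一个原子后面没有量词，量词设置为空字符串
--     return tokens
-- ===== SOURCE B (Python) =====
-- import re
--
-- _TOKEN = re.compile(r'(\[[^\]]*\]|\[[^\]]*$|.)([?*+]?)', re.DOTALL)
--
-- def tokenize_linear(regex):
--     return _TOKEN.findall(regex)
-- ===== Notes on version B (the rewrite author's own statement) =====
-- stated objective: idiomatic
-- what changed: Replaces the hand-written index/while tokenizer with a single re.findall over a pattern whose alternation (bracket class | unterminated class to end | any char) plus optional quantifier group yields the token pairs directly.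
import Mathlib
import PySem

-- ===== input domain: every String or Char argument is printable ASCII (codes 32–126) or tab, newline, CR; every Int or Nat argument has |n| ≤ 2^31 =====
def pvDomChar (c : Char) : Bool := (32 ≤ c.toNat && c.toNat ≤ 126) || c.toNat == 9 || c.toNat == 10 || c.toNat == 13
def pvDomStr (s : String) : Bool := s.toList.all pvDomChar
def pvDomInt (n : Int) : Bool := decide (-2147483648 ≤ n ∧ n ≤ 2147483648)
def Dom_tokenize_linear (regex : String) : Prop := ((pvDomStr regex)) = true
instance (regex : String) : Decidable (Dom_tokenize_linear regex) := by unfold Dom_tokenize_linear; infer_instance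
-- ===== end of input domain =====

-- B replaces A's hand-rolled index loop with a single regular-expression findall (idiomatic one-liner).

-- ===== PORT A =====
-- inner `while j < n and regex[j] != "]"` scan: returns (regex[i+1:j+1] — the class body,
-- including ']' when found — and the remainder regex[j+1:]).
def pvFindClose (cs : List Char) : List Char × List Char :=
  match cs with
  | [] => ([], [])
  | c :: r =>
    if c = ']' then ([c], r)
    else
      let p := pvFindClose r
      (c :: p.1, p.2)

-- cited by the port's decreasing_by
theorem pvFindClose_len (cs : List Char) : (pvFindClose cs).2.length ≤ cs.length := by
  induction cs with
  | nil => simp [pvFindClose]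
  | cons c r ih =>
    simp only [pvFindClose]
    split
    · simp
    · simpa using Nat.le_succ_of_le ih

-- the `while i < n` loop of A, on the remaining suffix of the string
def tokALoop (cs : List Char) : List (String × String) :=
  match h : cs with
  | [] => []
  | c :: rest =>
    let pr : List Char × List Char :=
      if c = '[' then
        let p := pvFindClose rest
        ('[' :: p.1, p.2)
      else ([c], rest)
    match h2 : pr.2 with
    | q :: r' =>
      if q = '?' ∨ q = '*' ∨ q = '+' then (String.ofList pr.1, String.ofList [q]) :: tokALoop r'
      else (String.ofList pr.1, "") :: tokALoop pr.2
    | [] => [(String.ofList pr.1, "")]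
  termination_by cs.length
  decreasing_by
  · subst h
    simp only [pr] at h2
    by_cases hc : c = '['
    · have hle := pvFindClose_len rest
      simp only [hc] at h2
      simp at h2
      rw [h2] at hle
      simp at hle ⊢
      omega
    · simp [hc] at h2
      simp [h2]
  · subst h
    by_cases hc : c = '['
    · have hle := pvFindClose_len rest
      simp [hc]
      omega
    · simp [hc]

def tokenize_linear (regex : String) : List (String × String) :=
  tokALoop regex.toList

-- ===== PORT B =====
-- hand-port of re.findall(r'(\[[^\]]*\]|\[[^\]]*$|.)([?*+]?)', regex, re.DOTALL):
-- at each position try the three atom alternatives in the regex engine's order,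
-- then the optional quantifier group.

-- alternative 1: '\[[^\]]*\]' — body of a bracket class up to and incl. the first ']'
def pvClassBody : List Char → Option (List Char × List Char)
  | [] => none
  | c :: r =>
    if c = ']' then some ([c], r)
    else (pvClassBody r).map (fun p => (c :: p.1, p.2))

def pvMatchClass : List Char → Option (List Char × List Char)
  | '[' :: r => (pvClassBody r).map (fun p => ('[' :: p.1, p.2))
  | _ => none

-- alternative 2: '\[[^\]]*$' — '[' running to end of string with no ']'
def pvMatchOpenEnd : List Char → Option (List Char × List Char)
  | '[' :: r => if r.all (· ≠ ']') then some ('[' :: r, []) else none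
  | _ => none

-- alternative 3: '.' with DOTALL — any single character
def pvMatchAny : List Char → Option (List Char × List Char)
  | [] => none
  | c :: r => some ([c], r)

-- '([?*+]?)' — the optional quantifier group
def pvMatchQuant : List Char → String × List Char
  | [] => ("", [])
  | c :: r => if c = '?' || c = '*' || c = '+' then (String.ofList [c], r) else ("", c :: r)

def pvMatchAtom (cs : List Char) : Option (List Char × List Char) :=
  ((pvMatchClass cs).orElse (fun _ => pvMatchOpenEnd cs)).orElse (fun _ => pvMatchAny cs)

-- A's bracket scan and B's first/second regex alternative compute the same split
-- (these three lemmas are cited by tokBLoop's decreasing_by through pvMatchAtom_len)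
theorem findClose_of_classBody_some {cs b r : List Char} (h : pvClassBody cs = some (b, r)) :
    pvFindClose cs = (b, r) := by
  induction cs generalizing b r with
  | nil => simp [pvClassBody] at h
  | cons c rest ih =>
    by_cases hcq : c = ']'
    · simp [pvClassBody, hcq] at h
      simp [pvFindClose, hcq, ← h.1, ← h.2]
    · simp only [pvClassBody, pvFindClose, if_neg hcq] at h ⊢
      rcases h3 : pvClassBody rest with _ | ⟨p⟩ <;> rw [h3] at h <;> simp at h
      rcases h with ⟨h1, h2⟩
      have := ih (b := p.1) (r := p.2) (by rw [h3])
      simp [this, ← h1, ← h2]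

theorem findClose_of_classBody_none {cs : List Char} (h : pvClassBody cs = none) :
    pvFindClose cs = (cs, []) ∧ cs.all (· ≠ ']') := by
  induction cs with
  | nil => simp [pvFindClose]
  | cons c rest ih =>
    by_cases hcq : c = ']'
    · simp [pvClassBody, hcq] at h
    · simp only [pvClassBody, if_neg hcq] at h
      rcases h3 : pvClassBody rest with _ | ⟨p⟩ <;> rw [h3] at h <;> simp at h
      rcases ih h3 with ⟨ih1, ih2⟩
      simp only [pvFindClose, if_neg hcq, ih1]
      simp at ih2 ⊢
      exact ⟨hcq, ih2⟩

-- B's atom alternation on a nonempty input computes exactly A's (atom, remainder) split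
theorem pvMatchAtom_eq (c : Char) (rest : List Char) :
    pvMatchAtom (c :: rest) =
      some (if c = '[' then ('[' :: (pvFindClose rest).1, (pvFindClose rest).2) else ([c], rest)) := by
  by_cases hc : c = '['
  · subst hc
    simp only [pvMatchAtom, pvMatchClass, pvMatchOpenEnd, pvMatchAny, Option.orElse]
    rcases h3 : pvClassBody rest with _ | ⟨b, rm⟩
    · rcases findClose_of_classBody_none h3 with ⟨hf, hall⟩
      rw [if_pos hall]
      simp [hf]
    · have hf := findClose_of_classBody_some h3
      simp [hf]
  · have hmc : pvMatchClass (c :: rest) = none := by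
      unfold pvMatchClass; split <;> simp_all
    have hmo : pvMatchOpenEnd (c :: rest) = none := by
      unfold pvMatchOpenEnd; split <;> simp_all
    simp [pvMatchAtom, hmc, hmo, pvMatchAny, Option.orElse, hc]

-- cited by the port's decreasing_by
theorem pvMatchAtom_len {cs a r : List Char} (h : pvMatchAtom cs = some (a, r)) :
    r.length < cs.length := by
  match cs with
  | [] => simp [pvMatchAtom, pvMatchClass, pvMatchOpenEnd, pvMatchAny, Option.orElse] at h
  | c :: rest =>
    rw [pvMatchAtom_eq] at h
    simp at h
    by_cases hc : c = '['
    · have hle := pvFindClose_len rest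
      simp [hc] at h
      rw [← h.2]
      simp
      omega
    · simp [hc] at h
      rw [← h.2]
      simp

-- cited by the port's decreasing_by
theorem pvMatchQuant_len (cs : List Char) : (pvMatchQuant cs).2.length ≤ cs.length := by
  match cs with
  | [] => simp [pvMatchQuant]
  | c :: r =>
    simp only [pvMatchQuant]
    split <;> simp

def tokBLoop (cs : List Char) : List (String × String) :=
  match h : pvMatchAtom cs with
  | none => []
  | some (atom, rest) =>
    let q := pvMatchQuant rest
    (String.ofList atom, q.1) :: tokBLoop q.2
  termination_by cs.length
  decreasing_by
    have h1 := pvMatchAtom_len h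
    have h2 := pvMatchQuant_len rest
    omega

def tokenize_linear_alt (regex : String) : List (String × String) :=
  tokBLoop regex.toList

-- ===== PRECONDITION & SPEC =====
def Spec_tokenize_linear (regex : String) (out : List (String × String)) : Prop := out = tokenize_linear_alt regex
instance (regex : String) (out : List (String × String)) : Decidable (Spec_tokenize_linear regex out) := by unfold Spec_tokenize_linear; infer_instance

-- ===== CLAIM (what is proved, stated in full; the proofs are below) =====
def Claim_equal_tokenize_linear : Prop := ∀ (regex : String), Dom_tokenize_linear regex → Spec_tokenize_linear regex (tokenize_linear regex)

-- ===== LEMMAS AND PROOFS =====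

theorem tokALoop_nil : tokALoop [] = [] := by
  rw [tokALoop.eq_def]

theorem tokBLoop_nil : tokBLoop [] = [] := by
  rw [tokBLoop.eq_def]
  simp [pvMatchAtom, pvMatchClass, pvMatchOpenEnd, pvMatchAny, Option.orElse]

-- one unfolding step of B's loop
theorem tokBLoop_step {cs : List Char} {p : List Char × List Char}
    (h : pvMatchAtom cs = some p) :
    tokBLoop cs = (String.ofList p.1, (pvMatchQuant p.2).1) :: tokBLoop (pvMatchQuant p.2).2 := by
  rw [tokBLoop.eq_def]
  split
  · rename_i heq
    rw [heq] at h
    simp at h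
  · rename_i atom rest heq
    rw [heq] at h
    simp at h
    simp [← h]

-- one unfolding step of A's loop, with its quantifier handling phrased through pvMatchQuant
theorem tokALoop_step (c : Char) (rest : List Char) :
    tokALoop (c :: rest) =
      (String.ofList (if c = '[' then ('[' :: (pvFindClose rest).1, (pvFindClose rest).2) else ([c], rest)).1,
        (pvMatchQuant (if c = '[' then ('[' :: (pvFindClose rest).1, (pvFindClose rest).2) else ([c], rest)).2).1) ::
      tokALoop (pvMatchQuant (if c = '[' then ('[' :: (pvFindClose rest).1, (pvFindClose rest).2) else ([c], rest)).2).2 := by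
  rw [tokALoop.eq_def]
  by_cases hc : c = '[' <;> simp only [hc, reduceIte] <;> split
  -- c = '[', remainder q :: r'
  · rename_i q r' heq
    rw [if_pos hc] at heq
    replace heq : (pvFindClose rest).2 = q :: r' := heq
    rw [heq]
    simp only [pvMatchQuant]
    by_cases hq : q = '?' ∨ q = '*' ∨ q = '+'
    · have hq' : (q = '?' || q = '*' || q = '+') = true := by
        rcases hq with h | h | h <;> simp [h]
      simp [hq, hq']
    · have hq' : ¬ ((q = '?' || q = '*' || q = '+') = true) := by
        simp only [Bool.or_eq_true, decide_eq_true_eq]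
        tauto
      simp [hq, hq']
  -- c = '[', remainder []
  · rename_i heq
    rw [if_pos hc] at heq
    replace heq : (pvFindClose rest).2 = [] := heq
    rw [heq]
    simp [pvMatchQuant, tokALoop_nil]
  -- c ≠ '[', remainder q :: r'
  · rename_i q r' heq
    rw [if_neg hc] at heq
    replace heq : rest = q :: r' := heq
    rw [heq]
    simp only [pvMatchQuant]
    by_cases hq : q = '?' ∨ q = '*' ∨ q = '+'
    · have hq' : (q = '?' || q = '*' || q = '+') = true := by
        rcases hq with h | h | h <;> simp [h]
      simp [hq, hq']
    · have hq' : ¬ ((q = '?' || q = '*' || q = '+') = true) := by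
        simp only [Bool.or_eq_true, decide_eq_true_eq]
        tauto
      simp [hq, hq']
  -- c ≠ '[', remainder []
  · rename_i heq
    rw [if_neg hc] at heq
    replace heq : rest = [] := heq
    rw [heq]
    simp [pvMatchQuant, tokALoop_nil]

theorem tokLoop_eq (n : Nat) (cs : List Char) (hn : cs.length ≤ n) :
    tokALoop cs = tokBLoop cs := by
  induction n generalizing cs with
  | zero =>
    have : cs = [] := by cases cs <;> simp_all
    subst this
    rw [tokALoop_nil, tokBLoop_nil]
  | succ n ih =>
    match cs with
    | [] => rw [tokALoop_nil, tokBLoop_nil]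
    | c :: rest =>
      rw [tokALoop_step c rest, tokBLoop_step (pvMatchAtom_eq c rest)]
      congr 1
      apply ih
      have h2 := pvMatchQuant_len (if c = '[' then ('[' :: (pvFindClose rest).1, (pvFindClose rest).2) else ([c], rest)).2
      have h1 : (if c = '[' then ('[' :: (pvFindClose rest).1, (pvFindClose rest).2) else ([c], rest)).2.length ≤ rest.length := by
        split
        · exact pvFindClose_len rest
        · exact le_rfl
      simp only [List.length_cons] at hn
      omega

-- ===== VERDICT (by name: the statement is the Claim_ definition above) =====
theorem tokenize_linear_spec : Claim_equal_tokenize_linear := by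
  intro regex _
  unfold Spec_tokenize_linear tokenize_linear tokenize_linear_alt
  exact tokLoop_eq regex.toList.length regex.toList le_rfl
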